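-- pv_equiv track=rewrite | github.com/Lorenzo-Della-Torre/odtb2pilot | supportfunctions/pretty_print.py | __get_spaces
-- ===== SOURCE A (Python) =====
-- def __get_spaces(name : str, max_item_length):
--     """Function used to get correct layout in the print.
--     It adds to correct amount of spaces so that the string "name" + spaces
--     are 50 chars long.
--
--     If name is longer than 46 chars only the first 46 will be shown
--
--     Args:
--         name (str): Input string, only used to know how many spaces that are needed
--         max_item_length (optional) (int): The maximum allowed length of a response_items name.
--         Everything after this length will be cut out
--
--     Returns:
--         string: string containing 43-len(name) spaces and one delimiter "|" in index
--         [number_of_spaces - 4]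
--     """
--     number_of_spaces = max_item_length - len(name) + 4
--     ret_string = ""
--     for i in range(number_of_spaces):
--         if i == number_of_spaces - 4:
--             ret_string += "|"
--         else:
--             ret_string += " "
--     return ret_string
-- ===== SOURCE B (Python) =====
-- def __get_spaces(name : str, max_item_length):
--     """Closed-form padding: spaces with a '|' 4 positions from the end."""
--     n = max_item_length - len(name) + 4
--     if n < 4:
--         return " " * n
--     return " " * (n - 4) + "|" + "   "
-- ===== Notes on version B (the rewrite author's own statement) =====
-- stated objective: faster
-- what changed: Replaced the per-character loop (which appends one char per index and tests i == n-4 each time) with a closed-form string expression: ' '*n when n<4, else ' '*(n-4)+'|'+' '.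
import Mathlib
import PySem

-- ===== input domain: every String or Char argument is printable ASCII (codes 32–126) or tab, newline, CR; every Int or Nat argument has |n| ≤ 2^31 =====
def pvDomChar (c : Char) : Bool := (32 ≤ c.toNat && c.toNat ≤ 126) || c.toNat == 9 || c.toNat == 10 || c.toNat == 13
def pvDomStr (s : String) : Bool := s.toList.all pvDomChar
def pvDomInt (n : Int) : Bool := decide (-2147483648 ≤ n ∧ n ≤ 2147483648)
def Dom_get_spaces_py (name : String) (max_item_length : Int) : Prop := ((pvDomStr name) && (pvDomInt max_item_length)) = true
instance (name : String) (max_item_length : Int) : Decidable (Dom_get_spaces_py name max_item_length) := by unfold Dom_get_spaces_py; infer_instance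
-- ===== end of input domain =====

-- B replaces A's per-index loop by a closed-form string expression (objective: faster, constant-factor).

-- ===== PORT A =====
-- literal port: number_of_spaces, then a loop over range(number_of_spaces) appending '|' at i = n-4, else ' '
def get_spaces_py (name : String) (max_item_length : Int) : String :=
  let number_of_spaces : Int := max_item_length - PySem.Str.len name + 4
  let ret_string : List Char :=
    (PySem.List.pyRange 0 number_of_spaces 1).foldl
      (fun acc i => acc ++ [if i = number_of_spaces - 4 then '|' else ' ']) []
  String.ofList ret_string

-- ===== PORT B =====
def get_spaces_py_alt (name : String) (max_item_length : Int) : String :=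
  let n : Int := max_item_length - PySem.Str.len name + 4
  if n < 4 then String.ofList (List.replicate n.toNat ' ')
  else String.ofList (List.replicate (n - 4).toNat ' ' ++ '|' :: List.replicate 3 ' ')

-- ===== PRECONDITION & SPEC =====
def Spec_get_spaces_py (name : String) (max_item_length : Int) (out : String) : Prop := out = get_spaces_py_alt name max_item_length
instance (name : String) (max_item_length : Int) (out : String) : Decidable (Spec_get_spaces_py name max_item_length out) := by unfold Spec_get_spaces_py; infer_instance

-- ===== CLAIM (what is proved, stated in full; the proofs are below) =====
def Claim_equal_get_spaces_py : Prop := ∀ (name : String) (max_item_length : Int), Dom_get_spaces_py name max_item_length → Spec_get_spaces_py name max_item_length (get_spaces_py name max_item_length)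

-- ===== LEMMAS AND PROOFS =====

-- the loop's character sequence when the bar position t = n-4 is in range (n = t+4)
lemma map_char_bar (t : Nat) :
    (List.range (t + 4)).map (fun (k : Nat) => if (k : Int) = (t : Int) then '|' else ' ')
      = List.replicate t ' ' ++ '|' :: List.replicate 3 ' ' := by
  rw [List.range_add, List.map_append]
  congr 1
  · have : ∀ k ∈ List.range t, (if (k : Int) = (t : Int) then '|' else ' ') = ' ' := by
      intro k hk
      simp only [List.mem_range] at hk
      have : (k : Int) ≠ (t : Int) := by exact_mod_cast Nat.ne_of_lt hk
      simp [this]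
    rw [List.map_congr_left this, List.map_const']
    simp
  · norm_num [List.range_succ, List.replicate]

-- the loop's character sequence when the bar is never reached (n < 4)
lemma map_char_nobar (n : Int) (hn : n < 4) :
    (List.range n.toNat).map (fun (k : Nat) => if (k : Int) = n - 4 then '|' else ' ')
      = List.replicate n.toNat ' ' := by
  have : ∀ k ∈ List.range n.toNat, (if (k : Int) = n - 4 then '|' else ' ') = ' ' := by
    intro k hk
    have : (k : Int) ≠ n - 4 := by
      have : (0 : Int) ≤ (k : Int) := Int.natCast_nonneg k
      omega
    simp [this]
  rw [List.map_congr_left this, List.map_const']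
  simp

-- ===== VERDICT (by name: the statement is the Claim_ definition above) =====
theorem get_spaces_py_spec : Claim_equal_get_spaces_py := by
  intro name m _
  unfold Spec_get_spaces_py get_spaces_py get_spaces_py_alt
  dsimp only
  set n : Int := m - PySem.Str.len name + 4 with hn
  rw [PySem.List.foldl_append_singleton_eq_map, List.nil_append,
      PySem.List.pyRange_one, List.map_map]
  have hmaps : ((fun i => if i = n - 4 then '|' else ' ') ∘ fun k : Nat => (0 : Int) + k)
      = fun k : Nat => if (k : Int) = n - 4 then '|' else ' ' := by
    funext k; simp
  rw [show n - 0 = n by ring, hmaps]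
  by_cases h : n < 4
  · rw [map_char_nobar n h, if_pos h]
  · rw [if_neg h]
    obtain ⟨T, hT⟩ : ∃ T, (n - 4).toNat = T := ⟨_, rfl⟩
    have ht : n.toNat = T + 4 := by omega
    have ht2 : (T : Int) = n - 4 := by omega
    rw [hT, ht, ← ht2, map_char_bar]
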